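-- pv_equiv track=rewrite | github.com/Marco-Mannara/ArtificialVision-FacialFeatureClassifier | scripts/process_dataset.py | count_classes
-- ===== SOURCE A (Python) =====
-- def count_classes(labels):
--     counts = [0,0,0]
--     positive_counts = [0,0,0]
--     for _,v in labels.items():
--         if v[0] == '1':
--             positive_counts[0] += 1
--         else:
--             counts[0] += 1
--         if v[1] == '1':
--             positive_counts[1] += 1
--         else:
--             counts[1] += 1
--         if v[2] == '1':
--             positive_counts[2] += 1
--         else:
--             counts[2] += 1
--     counts.extend(positive_counts)
--
--     return counts
-- ===== SOURCE B (Python) =====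
-- def count_classes(labels):
--     positive = [sum(1 for v in labels.values() if v[i] == '1') for i in range(3)]
--     n = len(labels)
--     return [n - p for p in positive] + positive
-- ===== Notes on version B (the rewrite author's own statement) =====
-- stated objective: simpler
-- what changed: Replaces the row-by-row loop that increments six counters with three column-wise positive counts and derives the negative counts algebraically as n - positives.
import Mathlib
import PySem

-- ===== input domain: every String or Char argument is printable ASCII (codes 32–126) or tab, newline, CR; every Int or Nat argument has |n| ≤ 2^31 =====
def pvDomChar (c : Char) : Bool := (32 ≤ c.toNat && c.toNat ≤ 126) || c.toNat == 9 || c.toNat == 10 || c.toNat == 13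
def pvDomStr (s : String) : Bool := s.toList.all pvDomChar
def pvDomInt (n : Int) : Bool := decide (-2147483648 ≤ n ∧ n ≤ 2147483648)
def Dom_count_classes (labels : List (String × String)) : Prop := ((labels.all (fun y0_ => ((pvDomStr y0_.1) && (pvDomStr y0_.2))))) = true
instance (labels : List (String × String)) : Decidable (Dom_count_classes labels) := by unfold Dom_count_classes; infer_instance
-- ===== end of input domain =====

-- B derives the negative counts as n - positives from three column-wise positive counts; objective: simpler.
-- ===== PORT A =====
-- one loop-body step of A: the three if/else increments on the six counters
def pvStepA (st : Int × Int × Int × Int × Int × Int) (kv : String × String) :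
    Int × Int × Int × Int × Int × Int :=
  let v := kv.2
  let (c0, c1, c2, p0, p1, p2) := st
  let (c0, p0) := if PySem.Str.pyGet? v 0 = some '1' then (c0, p0 + 1) else (c0 + 1, p0)
  let (c1, p1) := if PySem.Str.pyGet? v 1 = some '1' then (c1, p1 + 1) else (c1 + 1, p1)
  let (c2, p2) := if PySem.Str.pyGet? v 2 = some '1' then (c2, p2 + 1) else (c2 + 1, p2)
  (c0, c1, c2, p0, p1, p2)

def count_classes (labels : List (String × String)) : List Int :=
  let st := labels.foldl pvStepA (0, 0, 0, 0, 0, 0)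
  [st.1, st.2.1, st.2.2.1, st.2.2.2.1, st.2.2.2.2.1, st.2.2.2.2.2]

-- ===== PORT B =====
-- sum(1 for v in labels.values() if v[i] == '1')
def pvPos (labels : List (String × String)) (i : Int) : Int :=
  labels.foldl (fun acc kv => if PySem.Str.pyGet? kv.2 i = some '1' then acc + 1 else acc) 0

def count_classes_alt (labels : List (String × String)) : List Int :=
  let positive := (PySem.List.pyRange 0 3 1).map (fun i => pvPos labels i)
  let n : Int := labels.length
  positive.map (fun p => n - p) ++ positive

-- ===== PRECONDITION & SPEC =====
-- Pre_ excludes inputs where Python A raises: a value shorter than 3 characters (IndexError at v[0]/v[1]/v[2]);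
-- duplicate keys are excluded because the Python argument is a dict, which cannot hold them.
def Pre_count_classes (labels : List (String × String)) : Prop :=
  (∀ kv ∈ labels, 3 ≤ kv.2.toList.length) ∧ (labels.map Prod.fst).Nodup
instance (labels : List (String × String)) : Decidable (Pre_count_classes labels) := by unfold Pre_count_classes; infer_instance
def pvWitness_count_classes : (List (String × String)) := [("a", "101"), ("b", "010")]

def Spec_count_classes (labels : List (String × String)) (out : List Int) : Prop := out = count_classes_alt labels
instance (labels : List (String × String)) (out : List Int) : Decidable (Spec_count_classes labels out) := by unfold Spec_count_classes; infer_instance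

-- ===== CLAIM (what is proved, stated in full; the proofs are below) =====
def Claim_equal_count_classes : Prop := ∀ (labels : List (String × String)), Dom_count_classes labels → Pre_count_classes labels → Spec_count_classes labels (count_classes labels)

-- ===== LEMMAS AND PROOFS =====
theorem pvPos_eq_countP (labels : List (String × String)) (i : Int) :
    pvPos labels i = (labels.countP (fun kv => decide (PySem.Str.pyGet? kv.2 i = some '1')) : Int) := by
  unfold pvPos
  rw [PySem.List.foldl_ite_add_one]
  simp only [zero_add]

theorem pvFoldA_eq (labels : List (String × String))
    (c0 c1 c2 p0 p1 p2 : Int) :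
    labels.foldl pvStepA (c0, c1, c2, p0, p1, p2) =
      (c0 + ((labels.length : Int) - pvPos labels 0),
       c1 + ((labels.length : Int) - pvPos labels 1),
       c2 + ((labels.length : Int) - pvPos labels 2),
       p0 + pvPos labels 0, p1 + pvPos labels 1, p2 + pvPos labels 2) := by
  induction labels generalizing c0 c1 c2 p0 p1 p2 with
  | nil => simp [pvPos]
  | cons kv t ih =>
    simp only [pvPos_eq_countP] at ih ⊢
    simp only [List.foldl_cons, List.countP_cons, List.length_cons, decide_eq_true_eq]
    dsimp only [pvStepA]
    split_ifs with h0 h1 h2 <;>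
      · dsimp only
        rw [ih]
        simp only [Prod.mk.injEq]
        push_cast
        omega

-- ===== VERDICT (by name: the statement is the Claim_ definition above) =====
theorem count_classes_spec : Claim_equal_count_classes := by
  intro labels _ _
  unfold Spec_count_classes count_classes count_classes_alt
  rw [pvFoldA_eq]
  simp [PySem.List.pyRange, List.range_succ]
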